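-- pv_equiv track=rewrite | github.com/wangwei0807/cv_crawler | cv_crawler/captcha/hackedfuns.py | jsc_int_decode
-- ===== SOURCE A (Python) =====
-- def get_encrypt_code_array(
--         password='ef ghi  jklmnoL U3F9\\_XM?Ep  q rs1PW\');A0@.7I<JDC=:RV85-O6]t uv[ QG#`^BY,/K$%&S(2!"4+TH>*ZNacbd'):
--     arr = [0] * 32
--     for i in password:
--         arr.append(ord(i) - 33)
--     return arr
--
-- def jsc_str2arr(raw):
--     l = len(raw)
--     arr = []
--     encrypt_arr = get_encrypt_code_array()
--     i = 0
--     while i + 3 < l: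
--         a = encrypt_arr[ord(raw[i])]
--         b = encrypt_arr[ord(raw[i + 1])]
--         c = encrypt_arr[ord(raw[i + 2])]
--         d = encrypt_arr[ord(raw[i + 3])]
--         arr.append((a << 2) | (b >> 4))
--         arr.append(((b & 15) << 4) | (c >> 2))
--         arr.append(((c & 3) << 6) | d)
--         i += 4
--
--     if i < l:
--         a = encrypt_arr[ord(raw[i])]
--         b = encrypt_arr[ord(raw[i + 1])]
--         arr.append((a << 2) | (b >> 4))
--         if i + 2 < l:
--             c = encrypt_arr[ord(raw[i + 2])]
--             arr.append(((b & 15) << 4) | (c >> 2))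
--     return arr
--
-- def jsc_int_decode(raw):
--     arr = jsc_str2arr(raw)
--     a = (arr[0] << 8) + arr[1]
--     l = len(arr)
--     for i in range(2, l, 2):
--         arr[i] ^= (a >> 8) & 0xFF
--         i += 1
--         if i < l:
--             arr[i] ^= a & 0xFF
--         a += 1
--     return arr[2:]
-- ===== SOURCE B (Python) =====
-- def jsc_int_decode(raw):
--     password = ('ef ghi  jklmnoL U3F9\\_XM?Ep  q rs1PW\');A0@.7I<JDC=:RV85-O6]t uv'
--                 '[ QG#`^BY,/K$%&S(2!"4+TH>*ZNacbd')
--     enc = [0] * 32 + [ord(ch) - 33 for ch in password]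
--     vs = [enc[ord(c)] for c in raw]
--     l = len(vs)
--     n = 3 * (l // 4) + (0, 1, 1, 2)[l % 4]
--
--     def byte(k):
--         q, r = divmod(k, 3)
--         p = 4 * q + r
--         if r == 0:
--             return (vs[p] << 2) | (vs[p + 1] >> 4)
--         if r == 1:
--             return ((vs[p] & 15) << 4) | (vs[p + 1] >> 2)
--         return ((vs[p] & 3) << 6) | vs[p + 1]
--
--     a = (byte(0) << 8) + byte(1)
--     out = []
--     k = 2
--     while k < n:
--         out.append(byte(k) ^ ((a >> 8) & 0xFF))
--         if k + 1 < n: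
--             out.append(byte(k + 1) ^ (a & 0xFF))
--         a += 1
--         k += 2
--     return out
-- ===== Notes on version B (the rewrite author's own statement) =====
-- stated objective: alternative
-- what changed: B replaces A's two-pass structure (chunked while-loop building the full byte array, then in-place XOR mutation and a final slice) by a single keystream loop that computes each decoded byte on demand via a closed-form index p = 4*(k//3) + k%3 into the per-char value list, never materialising or mutating the intermediate array.
import Mathlib
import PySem

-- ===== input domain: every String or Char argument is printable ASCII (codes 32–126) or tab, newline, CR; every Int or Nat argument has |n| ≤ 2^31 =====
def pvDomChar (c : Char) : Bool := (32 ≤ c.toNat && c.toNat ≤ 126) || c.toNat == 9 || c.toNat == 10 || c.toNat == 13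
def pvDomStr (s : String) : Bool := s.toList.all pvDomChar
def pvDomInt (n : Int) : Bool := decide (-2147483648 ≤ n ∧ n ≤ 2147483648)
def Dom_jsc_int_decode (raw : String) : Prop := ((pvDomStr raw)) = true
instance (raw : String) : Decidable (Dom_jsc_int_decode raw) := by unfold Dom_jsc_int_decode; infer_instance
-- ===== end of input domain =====

-- B fuses decode and XOR into one streaming pass that addresses decoded byte k
-- directly by a closed-form index (4*(k/3) + k%3) into the value list, instead of
-- A's build-full-array-then-mutate-in-place two-pass structure (objective: alternative).

-- shared constant table (Python's get_encrypt_code_array, a fixed literal)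
def pvEnc : List Int :=
  List.replicate 32 0 ++
    ("ef ghi  jklmnoL U3F9\\_XM?Ep  q rs1PW');A0@.7I<JDC=:RV85-O6]t uv[ QG#`^BY,/K$%&S(2!\"4+TH>*ZNacbd").toList.map
      (fun c => (c.toNat : Int) - 33)

-- encrypt_arr[ord(c)]; exact for Dom chars (codes ≤ 126 < 127 = table length)
def pvVal (c : Char) : Int := pvEnc.getD c.toNat 0

-- ===== PORT A =====
-- the while-loop of jsc_str2arr, four chars per step; the ≤3-char tails are the
-- trailing `if i < l` block (a single leftover char raises IndexError in Python:
-- excluded by Pre_, the port returns [] there)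
def pvGoA : List Char → List Int
  | a :: b :: c :: d :: rest =>
      PySem.Int.bor (pvVal a <<< 2) (pvVal b >>> 4) ::
      PySem.Int.bor (PySem.Int.band (pvVal b) 15 <<< 4) (pvVal c >>> 2) ::
      PySem.Int.bor (PySem.Int.band (pvVal c) 3 <<< 6) (pvVal d) :: pvGoA rest
  | [] => []
  | [_] => []
  | [a, b] => [PySem.Int.bor (pvVal a <<< 2) (pvVal b >>> 4)]
  | [a, b, c] =>
      [PySem.Int.bor (pvVal a <<< 2) (pvVal b >>> 4),
       PySem.Int.bor (PySem.Int.band (pvVal b) 15 <<< 4) (pvVal c >>> 2)]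

-- the `for i in range(2, l, 2)` XOR loop of jsc_int_decode, acting on arr[2:]
def pvXorA (a : Int) : List Int → List Int
  | x :: y :: rest =>
      PySem.Int.bxor x (PySem.Int.band (a >>> 8) 255) ::
      PySem.Int.bxor y (PySem.Int.band a 255) :: pvXorA (a + 1) rest
  | [x] => [PySem.Int.bxor x (PySem.Int.band (a >>> 8) 255)]
  | [] => []

def jsc_int_decode (raw : String) : List Int :=
  match pvGoA raw.toList with
  | x :: y :: rest => pvXorA ((x <<< 8) + y) rest
  | _ => []  -- Python raises IndexError reading arr[0]/arr[1]; excluded by Pre_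

-- ===== PORT B =====
-- (0, 1, 1, 2)[l % 4]
def pvTail : Nat → Nat
  | 0 => 0
  | 1 => 1
  | 2 => 1
  | _ => 2

-- byte(k) of Source B: closed-form index p = 4*(k/3) + k%3 into the value list
-- (getD is exact here: inside Pre_ every index byte() is called with is in range)
def pvByte (vs : List Int) (k : Nat) : Int :=
  let r := k % 3
  let p := 4 * (k / 3) + r
  let x := vs.getD p 0
  let y := vs.getD (p + 1) 0
  if r = 0 then PySem.Int.bor (x <<< 2) (y >>> 4)
  else if r = 1 then PySem.Int.bor (PySem.Int.band x 15 <<< 4) (y >>> 2)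
  else PySem.Int.bor (PySem.Int.band x 3 <<< 6) y

-- the `while k < n` keystream loop of Source B
def pvBLoop (vs : List Int) (n k : Nat) (a : Int) : List Int :=
  if k < n then
    PySem.Int.bxor (pvByte vs k) (PySem.Int.band (a >>> 8) 255) ::
      ((if k + 1 < n then [PySem.Int.bxor (pvByte vs (k + 1)) (PySem.Int.band a 255)] else []) ++
        pvBLoop vs n (k + 2) (a + 1))
  else []
termination_by n - k

def jsc_int_decode_alt (raw : String) : List Int :=
  let vs := raw.toList.map pvVal
  let n := 3 * (vs.length / 4) + pvTail (vs.length % 4)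
  pvBLoop vs n 2 ((pvByte vs 0 <<< 8) + pvByte vs 1)

-- ===== PRECONDITION & SPEC =====
-- Pre_ excludes exactly the inputs where Python A raises IndexError:
-- length % 4 == 1 (lone trailing char, raw[i+1] out of range) and length < 3
-- (fewer than two decoded bytes, arr[1] out of range).
def Pre_jsc_int_decode (raw : String) : Prop :=
  3 ≤ raw.toList.length ∧ raw.toList.length % 4 ≠ 1
instance (raw : String) : Decidable (Pre_jsc_int_decode raw) := by
  unfold Pre_jsc_int_decode; infer_instance

def pvWitness_jsc_int_decode : String := "abcd"

def Spec_jsc_int_decode (raw : String) (out : List Int) : Prop := out = jsc_int_decode_alt raw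
instance (raw : String) (out : List Int) : Decidable (Spec_jsc_int_decode raw out) := by
  unfold Spec_jsc_int_decode; infer_instance

-- ===== CLAIM (what is proved, stated in full; the proofs are below) =====
def Claim_equal_jsc_int_decode : Prop := ∀ (raw : String), Dom_jsc_int_decode raw → Pre_jsc_int_decode raw → Spec_jsc_int_decode raw (jsc_int_decode raw)

-- ===== LEMMAS AND PROOFS =====

-- shifting the byte index by 3 = dropping one 4-char chunk of values
lemma pvByte_shift (v0 v1 v2 v3 : Int) (vs : List Int) (k : Nat) :
    pvByte (v0 :: v1 :: v2 :: v3 :: vs) (3 + k) = pvByte vs k := by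
  have hd : (3 + k) / 3 = k / 3 + 1 := by omega
  have hr : (3 + k) % 3 = k % 3 := by omega
  simp only [pvByte, hd, hr]
  have hp : 4 * (k / 3 + 1) + k % 3 = (4 * (k / 3) + k % 3) + 4 := by omega
  rw [hp]
  rfl

-- peel three leading indices off a range-map
lemma range_map_shift3 {α : Type} (F G : Nat → α) (m : Nat) (h : ∀ k, F (3 + k) = G k) :
    (List.range (3 + m)).map F = F 0 :: F 1 :: F 2 :: (List.range m).map G := by
  rw [List.range_add, List.map_append]
  have h3 : (List.range 3).map F = [F 0, F 1, F 2] := by simp [List.range_succ]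
  rw [h3]
  simp only [List.map_map, List.cons_append, List.nil_append]
  congr 1; congr 1; congr 1
  exact List.map_congr_left (fun k _ => h k)

-- A's chunked decoder produces exactly B's bytes, in index order
lemma goA_eq_map (cs : List Char) (h : cs.length % 4 ≠ 1) :
    pvGoA cs =
      (List.range (3 * (cs.length / 4) + pvTail (cs.length % 4))).map
        (pvByte (cs.map pvVal)) := by
  induction cs using pvGoA.induct with
  | case1 a b c d rest ih =>
      have hl : (a :: b :: c :: d :: rest).length = rest.length + 4 := by simp
      have hmr : rest.length % 4 ≠ 1 := by
        have := h; rw [hl] at this; omega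
      have hn : 3 * ((a :: b :: c :: d :: rest).length / 4) +
            pvTail ((a :: b :: c :: d :: rest).length % 4)
          = 3 + (3 * (rest.length / 4) + pvTail (rest.length % 4)) := by
        rw [hl]
        have hd : (rest.length + 4) / 4 = rest.length / 4 + 1 := by omega
        have hm : (rest.length + 4) % 4 = rest.length % 4 := by omega
        rw [hd, hm]; omega
      rw [pvGoA, ih hmr, hn,
        range_map_shift3 (pvByte ((a :: b :: c :: d :: rest).map pvVal))
          (pvByte (rest.map pvVal)) _
          (fun k => by
            simpa using pvByte_shift (pvVal a) (pvVal b) (pvVal c) (pvVal d) (rest.map pvVal) k)]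
      simp [pvByte]
  | case2 => simp [pvGoA, pvTail]
  | case3 x => simp at h
  | case4 a b => simp [pvGoA, pvTail, List.range_succ, pvByte]
  | case5 a b c => simp [pvGoA, pvTail, List.range_succ, pvByte]

-- B's keystream loop = A's pairwise XOR loop over the byte indices still to visit
lemma bLoop_eq_xorA (vs : List Int) (n k : Nat) (a : Int) :
    pvBLoop vs n k a = pvXorA a ((List.range' k (n - k)).map (pvByte vs)) := by
  induction k, a using pvBLoop.induct (n := n) with
  | case1 k a hk ih =>
      rw [pvBLoop]
      simp only [hk, if_true]
      by_cases hk1 : k + 1 < n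
      · have h2 : n - k = (n - (k + 2)) + 1 + 1 := by omega
        rw [h2, List.range'_succ, List.range'_succ]
        simp only [hk1, if_true, List.map_cons, pvXorA, List.cons_append, List.nil_append]
        rw [ih]
      · have h1 : n - k = 0 + 1 := by omega
        have h0 : n - (k + 2) = 0 := by omega
        rw [h1, List.range'_succ]
        simp only [hk1, if_false, List.nil_append, List.range'_zero, List.map_cons,
          List.map_nil, pvXorA]
        rw [ih, h0]
        simp [pvXorA]
  | case2 k a hk =>
      rw [pvBLoop]
      simp only [hk, if_false]
      have h0 : n - k = 0 := by omega
      rw [h0]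
      simp [pvXorA]

-- ===== VERDICT (by name: the statement is the Claim_ definition above) =====
theorem jsc_int_decode_spec : Claim_equal_jsc_int_decode := by
  intro raw _ hpre
  obtain ⟨hlen, hmod⟩ := hpre
  unfold Spec_jsc_int_decode jsc_int_decode jsc_int_decode_alt
  have hvl : (List.map pvVal raw.toList).length = raw.toList.length := by simp
  have harr := goA_eq_map raw.toList hmod
  rw [← hvl] at harr
  have hn2 : 2 ≤ 3 * ((List.map pvVal raw.toList).length / 4) +
      pvTail ((List.map pvVal raw.toList).length % 4) := by
    rw [hvl]
    have hc : raw.toList.length % 4 = 0 ∨ raw.toList.length % 4 = 2 ∨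
        raw.toList.length % 4 = 3 := by omega
    rcases hc with h | h | h <;> rw [h] <;> simp only [pvTail] <;> omega
  rw [harr]
  have hrange : List.range (3 * ((List.map pvVal raw.toList).length / 4) +
        pvTail ((List.map pvVal raw.toList).length % 4)) =
      0 :: 1 :: List.range' 2 ((3 * ((List.map pvVal raw.toList).length / 4) +
        pvTail ((List.map pvVal raw.toList).length % 4)) - 2) := by
    generalize 3 * ((List.map pvVal raw.toList).length / 4) +
        pvTail ((List.map pvVal raw.toList).length % 4) = n at hn2 ⊢
    obtain ⟨m, rfl⟩ : ∃ m, n = m + 2 := ⟨n - 2, by omega⟩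
    rw [List.range_eq_range']
    rw [show m + 2 = (m + 1) + 1 from rfl, List.range'_succ, List.range'_succ]
    simp
  rw [hrange]
  simp only [List.map_cons]
  rw [bLoop_eq_xorA]
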